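-- pv_equiv track=rewrite | github.com/brksdl/hurricane-analysis | hurricane-analysis.py | most_affected_area
-- ===== SOURCE A (Python) =====
-- def most_affected_area(affected_areas_count):
--   count = 0
--   mostDict = dict()
--   for most in affected_areas_count.items():
--     if most[-1] > count:
--       count = most[-1]
--       mostDict[most[0]] = count
--   return mostDict
-- ===== SOURCE B (Python) =====
-- def most_affected_area(affected_areas_count):
--     prefix = [0]
--     for v in affected_areas_count.values():
--         prefix.append(max(prefix[-1], v))
--     return {k: hi
--             for (k, _), (lo, hi) in zip(affected_areas_count.items(),
--                                         zip(prefix, prefix[1:]))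
--             if hi > lo}
-- ===== Notes on version B (the rewrite author's own statement) =====
-- stated objective: alternative
-- what changed: Replaces the single inline running-max loop with two differently-shaped passes: first build the prefix-maxima sequence (baseline 0), then select via a comprehension exactly the positions where the prefix max strictly increases.
import Mathlib
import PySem

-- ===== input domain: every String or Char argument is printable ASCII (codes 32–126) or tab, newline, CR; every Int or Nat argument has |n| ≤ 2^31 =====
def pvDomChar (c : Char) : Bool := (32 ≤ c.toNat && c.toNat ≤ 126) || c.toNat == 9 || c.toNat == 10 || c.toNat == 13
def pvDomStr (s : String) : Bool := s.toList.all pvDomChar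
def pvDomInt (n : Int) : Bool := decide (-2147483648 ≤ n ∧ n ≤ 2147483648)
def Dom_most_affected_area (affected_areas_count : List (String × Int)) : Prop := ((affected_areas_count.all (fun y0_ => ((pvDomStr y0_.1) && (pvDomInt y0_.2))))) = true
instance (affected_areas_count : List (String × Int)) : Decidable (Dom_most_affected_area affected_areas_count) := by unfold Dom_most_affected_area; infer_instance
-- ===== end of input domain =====

-- B replaces the inline running-max loop by two passes (prefix-maxima list, then selection of strict increases): an alternative decomposition, same cost.

-- ===== PORT A =====
-- Fold over the items with state (count, mostDict); most[-1] is most.2, most[0] is most.1.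
def most_affected_area (affected_areas_count : List (String × Int)) : List (String × Int) :=
  (affected_areas_count.foldl
    (fun (st : Int × PySem.Dict String Int) most =>
      if most.2 > st.1 then (most.2, st.2.insert most.1 most.2) else st)
    (0, PySem.Dict.empty)).2.items

-- ===== PORT B =====
-- Pass 1: prefix-maxima list (baseline 0); Pass 2: dict comprehension over the zipped strict increases.
def most_affected_area_alt (affected_areas_count : List (String × Int)) : List (String × Int) :=
  let pref := affected_areas_count.foldl
    (fun (acc : List Int) kv => acc ++ [max acc.getLast! kv.2]) [0]
  (((affected_areas_count.zip (pref.zip pref.tail)).filterMap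
      (fun p => if p.2.2 > p.2.1 then some (p.1.1, p.2.2) else none)).foldl
    (fun (d : PySem.Dict String Int) kv => d.insert kv.1 kv.2) PySem.Dict.empty).items

-- ===== PRECONDITION & SPEC =====
def Spec_most_affected_area (affected_areas_count : List (String × Int)) (out : List (String × Int)) : Prop := out = most_affected_area_alt affected_areas_count
instance (affected_areas_count : List (String × Int)) (out : List (String × Int)) : Decidable (Spec_most_affected_area affected_areas_count out) := by unfold Spec_most_affected_area; infer_instance

-- ===== CLAIM (what is proved, stated in full; the proofs are below) =====
def Claim_equal_most_affected_area : Prop := ∀ (affected_areas_count : List (String × Int)), Dom_most_affected_area affected_areas_count → Spec_most_affected_area affected_areas_count (most_affected_area affected_areas_count)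

-- ===== LEMMAS AND PROOFS =====

-- ===== VERDICT (by name: the statement is the Claim_ definition above) =====
-- scanMax c vs = the prefix-maxima sequence starting from running max c
def scanMax (c : Int) : List Int → List Int
  | [] => [c]
  | v :: vs => c :: scanMax (max c v) vs

-- selected xs c = the (key, new max) pairs A records, given running max c
def selected (c : Int) : List (String × Int) → List (String × Int)
  | [] => []
  | (k, v) :: r => if v > c then (k, v) :: selected v r else selected c r

theorem getLast!_concat (l : List Int) (c : Int) : (l ++ [c]).getLast! = c := by
  simp [List.getLast!_eq_getLast?_getD]

theorem foldl_scan (xs : List (String × Int)) (pre : List Int) (c : Int) :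
    xs.foldl (fun (acc : List Int) kv => acc ++ [max acc.getLast! kv.2]) (pre ++ [c])
      = pre ++ scanMax c (xs.map Prod.snd) := by
  induction xs generalizing pre c with
  | nil => simp [scanMax]
  | cons hd tl ih =>
    simp only [List.foldl_cons, getLast!_concat, List.map_cons, scanMax]
    simpa using ih (pre ++ [c]) (max c hd.2)

theorem scan_select (xs : List (String × Int)) (c : Int) :
    (xs.zip ((scanMax c (xs.map Prod.snd)).zip (scanMax c (xs.map Prod.snd)).tail)).filterMap
      (fun p => if p.2.2 > p.2.1 then some (p.1.1, p.2.2) else none)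
    = selected c xs := by
  induction xs generalizing c with
  | nil => simp [scanMax, selected]
  | cons hd tl ih =>
    obtain ⟨k, v⟩ := hd
    simp only [List.map_cons, scanMax, selected]
    cases tl with
    | nil =>
      by_cases h : v > c
      · simp [scanMax, selected, List.zip, h, max_eq_right (le_of_lt h)]
      · simp [scanMax, selected, List.zip, h, max_eq_left (not_lt.mp h)]
    | cons hd2 tl2 =>
      simp only [List.map_cons, scanMax, List.tail, List.zip_cons_cons, List.filterMap_cons]
      by_cases h : v > c
      · have hm : max c v = v := max_eq_right (le_of_lt h)
        simp only [hm, if_pos h]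
        rw [← ih v]
        simp [scanMax, List.zip]
      · have hm : max c v = c := max_eq_left (not_lt.mp h)
        simp only [hm, if_neg h]
        rw [← ih c]
        simp [scanMax, List.zip]

theorem foldl_A (xs : List (String × Int)) (c : Int) (d : PySem.Dict String Int) :
    (xs.foldl
      (fun (st : Int × PySem.Dict String Int) most =>
        if most.2 > st.1 then (most.2, st.2.insert most.1 most.2) else st) (c, d)).2
    = (selected c xs).foldl (fun (d : PySem.Dict String Int) kv => d.insert kv.1 kv.2) d := by
  induction xs generalizing c d with
  | nil => simp [selected]
  | cons hd tl ih =>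
    obtain ⟨k, v⟩ := hd
    simp only [List.foldl_cons, selected]
    by_cases h : v > c
    · simp only [if_pos h]; exact ih v (d.insert k v)
    · simp only [if_neg h]; exact ih c d

theorem most_affected_area_spec : Claim_equal_most_affected_area := by
  intro xs _
  unfold Spec_most_affected_area most_affected_area most_affected_area_alt
  have hpre := foldl_scan xs [] 0
  simp only [List.nil_append] at hpre
  rw [foldl_A, hpre]
  exact congrArg
    (fun l : List (String × Int) =>
      (l.foldl (fun (d : PySem.Dict String Int) kv => d.insert kv.1 kv.2) PySem.Dict.empty).items)
    (scan_select xs 0).symm
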